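-- pv_equiv track=rewrite | github.com/WalterAlturoaAparicio/bird-lab | src/utils/split.py | _largest_bucket
-- ===== SOURCE A (Python) =====
-- from typing import Dict, List, Optional, Sequence, Set, Tuple, Union
--
-- def _largest_bucket(
--     counts: Dict[str, int],
--     exclude: str,
-- ) -> Optional[str]:
--     candidates = [(k, v) for k, v in counts.items() if k != exclude]
--     if not candidates:
--         return None
--     candidates.sort(key=lambda item: item[1], reverse=True)
--     return candidates[0][0]
-- ===== SOURCE B (Python) =====
-- def _largest_bucket(counts, exclude):
--     best_key = None
--     best_val = 0
--     for k, v in counts.items():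
--         if k == exclude:
--             continue
--         if best_key is None or v > best_val:
--             best_key, best_val = k, v
--     return best_key
-- ===== Notes on version B (the rewrite author's own statement) =====
-- stated objective: simpler
-- what changed: Replaced build-list + stable reverse sort + index with a single pass keeping the best key so far, updating only on a strictly greater value (preserving the first-among-ties behaviour of the stable reverse sort).
import Mathlib
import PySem

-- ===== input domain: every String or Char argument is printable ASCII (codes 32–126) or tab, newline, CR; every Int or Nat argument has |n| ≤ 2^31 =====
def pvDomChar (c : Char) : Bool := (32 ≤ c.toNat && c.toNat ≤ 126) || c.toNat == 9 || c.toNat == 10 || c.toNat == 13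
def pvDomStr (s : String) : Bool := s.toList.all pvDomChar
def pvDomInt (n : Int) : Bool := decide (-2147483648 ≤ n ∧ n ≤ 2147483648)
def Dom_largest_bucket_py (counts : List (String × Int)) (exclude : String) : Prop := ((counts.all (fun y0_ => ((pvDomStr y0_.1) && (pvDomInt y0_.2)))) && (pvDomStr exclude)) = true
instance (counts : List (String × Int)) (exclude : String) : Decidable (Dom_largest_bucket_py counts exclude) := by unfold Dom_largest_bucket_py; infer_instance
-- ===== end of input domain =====

-- B replaces A's list-build + stable reverse sort + index by a single left-to-right pass
-- keeping the first key of maximal value (objective: simpler).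


-- ===== PORT A =====
-- candidates = [(k, v) for k, v in counts.items() if k != exclude];
-- if not candidates: return None; candidates.sort(key=..., reverse=True); return candidates[0][0]
def largest_bucket_py (counts : List (String × Int)) (exclude : String) : Option String :=
  let candidates := counts.filter (fun kv => kv.1 != exclude)
  if candidates.isEmpty then none
  else some ((PySem.List.sorted candidates (fun item => item.2) true).headI).1

-- ===== PORT B =====
-- single pass: best_key = None, best_val = 0; update on strictly greater value
def largest_bucket_py_alt (counts : List (String × Int)) (exclude : String) : Option String :=
  (counts.foldl
    (fun acc kv =>
      if kv.1 == exclude then acc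
      else if acc.1 = none ∨ acc.2 < kv.2 then (some kv.1, kv.2) else acc)
    ((none : Option String), (0 : Int))).1

-- ===== PRECONDITION & SPEC =====
def Spec_largest_bucket_py (counts : List (String × Int)) (exclude : String) (out : Option String) : Prop := out = largest_bucket_py_alt counts exclude
instance (counts : List (String × Int)) (exclude : String) (out : Option String) : Decidable (Spec_largest_bucket_py counts exclude out) := by unfold Spec_largest_bucket_py; infer_instance

-- ===== CLAIM (what is proved, stated in full; the proofs are below) =====
def Claim_equal_largest_bucket_py : Prop := ∀ (counts : List (String × Int)) (exclude : String), Dom_largest_bucket_py counts exclude → Spec_largest_bucket_py counts exclude (largest_bucket_py counts exclude)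

-- ===== LEMMAS AND PROOFS =====

-- "better of the two, first wins ties" step shared by both characterisations
def pvBest (h x : String × Int) : String × Int := if h.2 < x.2 then x else h

-- head of the insertion-sort fold evolves exactly by pvBest
theorem headI_foldl_insertBy (l : List (String × Int)) :
    ∀ (y : String × Int) (ys : List (String × Int)),
    (List.foldl (fun acc x => PySem.List.insertBy (fun a b => decide (b.2 < a.2)) x acc) (y :: ys) l).headI
      = List.foldl pvBest y l := by
  induction l with
  | nil => intro y ys; rfl
  | cons x l ih =>
    intro y ys
    simp only [List.foldl_cons, PySem.List.insertBy, pvBest]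
    by_cases h : y.2 < x.2
    · simp only [h, decide_true, if_true]
      exact ih x (y :: ys)
    · simp only [h, decide_false, if_false]
      exact ih y (PySem.List.insertBy (fun a b => decide (b.2 < a.2)) x ys)

-- B's fold, once the accumulator is some, is pvBest on the underlying pair
theorem foldl_alt_some (l : List (String × Int)) :
    ∀ (h : String × Int),
    List.foldl (fun acc x => if acc.1 = none ∨ acc.2 < x.2 then (some x.1, x.2) else acc)
      (some h.1, h.2) l
      = (some (List.foldl pvBest h l).1, (List.foldl pvBest h l).2) := by
  induction l with
  | nil => intro h; rfl
  | cons x l ih =>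
    intro h
    simp only [List.foldl_cons, pvBest]
    by_cases hv : h.2 < x.2
    · simp only [hv, or_true, if_true]
      exact ih x
    · have : ¬ ((some h.1 : Option String) = none ∨ h.2 < x.2) := by simp [hv]
      simp only [this, if_false, if_neg hv]
      exact ih h

theorem largest_bucket_py_eq_alt (counts : List (String × Int)) (exclude : String) :
    largest_bucket_py counts exclude = largest_bucket_py_alt counts exclude := by
  unfold largest_bucket_py largest_bucket_py_alt
  have hstep : (fun (acc : Option String × Int) (kv : String × Int) =>
      if kv.1 == exclude then acc
      else if acc.1 = none ∨ acc.2 < kv.2 then (some kv.1, kv.2) else acc)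
      = (fun acc kv => if (kv.1 != exclude) then
          (if acc.1 = none ∨ acc.2 < kv.2 then (some kv.1, kv.2) else acc) else acc) := by
    funext acc kv
    cases hb : (kv.1 == exclude) <;> simp [bne, hb]
  rw [hstep, PySem.List.foldl_if_eq_foldl_filter]
  cases hc : counts.filter (fun kv => kv.1 != exclude) with
  | nil => simp
  | cons c cs =>
    simp only [List.isEmpty_cons, if_false, Bool.false_eq_true]
    rw [PySem.List.sorted_rev_eq_foldl_insertBy]
    simp only [List.foldl_cons]
    have h1 : PySem.List.insertBy (fun a b => decide (b.2 < a.2)) c ([] : List (String × Int))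
        = [c] := rfl
    rw [h1, headI_foldl_insertBy cs c []]
    show some (List.foldl pvBest c cs).1
      = (List.foldl _ (if ((none : Option String) = none ∨ (0:Int) < c.2) then (some c.1, c.2)
          else ((none : Option String), (0 : Int))) cs).1
    rw [if_pos (Or.inl rfl), foldl_alt_some cs c]

-- ===== VERDICT (by name: the statement is the Claim_ definition above) =====
theorem largest_bucket_py_spec : Claim_equal_largest_bucket_py := by
  intro counts exclude _
  unfold Spec_largest_bucket_py
  exact largest_bucket_py_eq_alt counts exclude
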